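-- pv_equiv track=rewrite | github.com/alexwu2021/practice | Python/python3/leetcode/Easy/ShortestCompletingWord.py | shortestCompletingWord_okay
-- ===== SOURCE A (Python) =====
-- from typing import List
--
-- def shortestCompletingWord_okay(licensePlate: str, words: List[str]) -> str:
--
--     licensePlate = ''.join([i.lower() for i in licensePlate if i.isalpha()])
--
--     words = sorted(words, key=len) # it is a must
--     for word in words:
--         for i in range(len(licensePlate)):
--             if word.count(licensePlate[i]) < licensePlate.count(licensePlate[i]):
--                 break
--             if i == len(licensePlate) - 1:
--                 return word
-- ===== SOURCE B (Python) =====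
-- def shortestCompletingWord_okay(licensePlate, words):
--     need = {}
--     for c in licensePlate:
--         if c.isalpha():
--             c = c.lower()
--             need[c] = need.get(c, 0) + 1
--     best = None
--     for w in words:
--         if best is not None and len(w) >= len(best):
--             continue
--         have = {}
--         for c in w:
--             have[c] = have.get(c, 0) + 1
--         if all(have.get(c, 0) >= n for c, n in need.items()):
--             best = w
--     return best
-- ===== Notes on version B (the rewrite author's own statement) =====
-- stated objective: alternative
-- what changed: Replaced A's sort-words-by-length-then-scan-for-first-completer with a single unsorted pass that keeps the best (strictly shorter) completing word seen so far, using count dictionaries instead of repeated str.count calls.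
-- outside the precondition, e.g. on shortestCompletingWord_okay('12', ['a']): A returns None, B returns 'a'
import Mathlib
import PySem

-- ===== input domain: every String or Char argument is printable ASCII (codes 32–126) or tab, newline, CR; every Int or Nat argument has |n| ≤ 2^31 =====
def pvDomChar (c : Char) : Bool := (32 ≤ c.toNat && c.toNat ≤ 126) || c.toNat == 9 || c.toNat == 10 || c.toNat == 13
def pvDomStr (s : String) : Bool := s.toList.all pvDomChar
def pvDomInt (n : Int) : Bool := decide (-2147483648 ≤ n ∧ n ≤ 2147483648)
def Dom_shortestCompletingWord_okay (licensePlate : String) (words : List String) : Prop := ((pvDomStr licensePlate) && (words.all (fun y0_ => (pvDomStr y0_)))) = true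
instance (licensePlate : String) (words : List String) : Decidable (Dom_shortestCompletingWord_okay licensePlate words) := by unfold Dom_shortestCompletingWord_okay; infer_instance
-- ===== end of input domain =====

-- B replaces A's sort-then-scan with a single pass over the original words keeping the best
-- candidate so far (objective: alternative decomposition; also avoids the sort).
-- Equivalence is about the RETURN value; neither version mutates its arguments.

-- ===== PORT A =====
-- ''.join([i.lower() for i in licensePlate if i.isalpha()])  (exact on the ASCII domain via PySem.Chars)
def pvPlateA (licensePlate : String) : List Char :=
  (licensePlate.toList.filter PySem.Chars.isalpha).map PySem.Chars.lowerChar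

-- the inner `for i in range(len(licensePlate))` loop; `word.count(plate[i])` counts a
-- one-character substring, which is exactly `List.count` of that character
def pvACheck (plate word : List Char) (i : Nat) : Bool :=
  if h : i < plate.length then
    if word.count plate[i] < plate.count plate[i] then false
    else if i = plate.length - 1 then true
    else pvACheck plate word (i+1)
  else false
termination_by plate.length - i

-- the outer `for word in words` loop (falls off the end → None)
def pvALoop (plate : List Char) : List String → Option String
  | [] => none
  | w :: ws => if pvACheck plate w.toList 0 then some w else pvALoop plate ws

def shortestCompletingWord_okay (licensePlate : String) (words : List String) : Option String :=
  pvALoop (pvPlateA licensePlate) (PySem.List.sorted words (fun w => PySem.Str.len w))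

-- ===== PORT B =====
-- need[c] = need.get(c, 0) + 1 over the alphabetic, lowered plate characters
def pvNeedB (licensePlate : String) : PySem.Dict Char Int :=
  licensePlate.toList.foldl
    (fun d c =>
      if PySem.Chars.isalpha c then
        d.insert (PySem.Chars.lowerChar c) (d.getD (PySem.Chars.lowerChar c) 0 + 1)
      else d)
    PySem.Dict.empty

-- per-word count table and the all(...) completing test
def pvCompletesB (need : PySem.Dict Char Int) (w : String) : Bool :=
  let haveD := w.toList.foldl (fun d c => d.insert c (d.getD c 0 + 1)) PySem.Dict.empty
  need.items.all (fun p => haveD.getD p.1 0 ≥ p.2)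

-- one iteration of `for w in words` (skip longer-or-equal words, else test and keep)
def pvBStep (need : PySem.Dict Char Int) (best : Option String) (w : String) : Option String :=
  match best with
  | some b => if PySem.Str.len w ≥ PySem.Str.len b then some b
              else if pvCompletesB need w then some w else some b
  | none => if pvCompletesB need w then some w else none

-- `best = None; for w in words: ...; return best`
def pvBLoop (need : PySem.Dict Char Int) (words : List String) : Option String :=
  words.foldl (pvBStep need) none

def shortestCompletingWord_okay_alt (licensePlate : String) (words : List String) : Option String :=
  pvBLoop (pvNeedB licensePlate) words

-- ===== PRECONDITION & SPEC =====
-- Pre_ excludes plates with no alphabetic character: there A's declared `-> str` falls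
-- through and returns None (not a str), while B returns the shortest word (every word
-- completes an empty requirement).
def Pre_shortestCompletingWord_okay (licensePlate : String) (words : List String) : Prop :=
  licensePlate.toList.any PySem.Chars.isalpha = true
instance (licensePlate : String) (words : List String) : Decidable (Pre_shortestCompletingWord_okay licensePlate words) := by unfold Pre_shortestCompletingWord_okay; infer_instance

def pvWitness_shortestCompletingWord_okay : String × List String := ("aB 1c", ["zz", "cab", "bca"])

def Spec_shortestCompletingWord_okay (licensePlate : String) (words : List String) (out : Option String) : Prop := out = shortestCompletingWord_okay_alt licensePlate words
instance (licensePlate : String) (words : List String) (out : Option String) : Decidable (Spec_shortestCompletingWord_okay licensePlate words out) := by unfold Spec_shortestCompletingWord_okay; infer_instance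

-- ===== CLAIM (what is proved, stated in full; the proofs are below) =====
def Claim_equal_shortestCompletingWord_okay : Prop := ∀ (licensePlate : String) (words : List String), Dom_shortestCompletingWord_okay licensePlate words → Pre_shortestCompletingWord_okay licensePlate words → Spec_shortestCompletingWord_okay licensePlate words (shortestCompletingWord_okay licensePlate words)

-- ===== LEMMAS AND PROOFS =====

-- A's inner loop passes iff every plate character is covered with multiplicity
theorem pvACheck_iff (plate word : List Char) (i : Nat) (hi : i < plate.length) :
    pvACheck plate word i = true ↔
      ∀ j, i ≤ j → ∀ (hj : j < plate.length),
        plate.count plate[j] ≤ word.count plate[j] := by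
  induction hn : plate.length - i generalizing i with
  | zero => omega
  | succ n ih =>
    rw [pvACheck, dif_pos hi]
    by_cases hc : word.count plate[i] < plate.count plate[i]
    · rw [if_pos hc]
      refine iff_of_false (by simp) ?_
      intro h
      have := h i le_rfl hi
      omega
    · rw [if_neg hc]
      by_cases hl : i = plate.length - 1
      · rw [if_pos hl]
        refine iff_of_true rfl ?_
        intro j hij hj
        have : j = i := by omega
        subst this
        omega
      · rw [if_neg hl]
        have hi1 : i + 1 < plate.length := by omega
        rw [ih (i+1) hi1 (by omega)]
        constructor
        · intro h j hij hj
          by_cases hji : j = i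
          · subst hji; omega
          · exact h j (by omega) hj
        · intro h j hij hj
          exact h j (by omega) hj

theorem pvACheck_zero_iff (plate word : List Char) (hne : plate ≠ []) :
    pvACheck plate word 0 = true ↔ ∀ c ∈ plate, plate.count c ≤ word.count c := by
  have h0 : 0 < plate.length := List.length_pos_iff.mpr hne
  rw [pvACheck_iff plate word 0 h0]
  constructor
  · intro h c hc
    obtain ⟨j, hj, rfl⟩ := List.mem_iff_getElem.mp hc
    exact h j (Nat.zero_le _) hj
  · intro h j _ hj
    exact h _ (List.getElem_mem hj)

-- the guarded fold over the raw plate is the plain counting fold over the normalized plate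
theorem pvFoldGuard (l : List Char) (d : PySem.Dict Char Int) :
    l.foldl
      (fun d c =>
        if PySem.Chars.isalpha c then
          d.insert (PySem.Chars.lowerChar c) (d.getD (PySem.Chars.lowerChar c) 0 + 1)
        else d) d
    = ((l.filter PySem.Chars.isalpha).map PySem.Chars.lowerChar).foldl
        (fun d c => d.insert c (d.getD c 0 + 1)) d := by
  induction l generalizing d with
  | nil => rfl
  | cons c l ih =>
    by_cases hc : PySem.Chars.isalpha c
    · simp [List.foldl_cons, hc, ih]
    · simp [List.foldl_cons, hc, ih]

-- B's need-dict is Counter of A's normalized plate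
theorem pvNeedB_eq (licensePlate : String) :
    pvNeedB licensePlate = PySem.Dict.counter (pvPlateA licensePlate) := by
  unfold pvNeedB pvPlateA
  rw [pvFoldGuard]
  exact PySem.Dict.foldl_insert_getD_add_one_eq_counter _

theorem pvCompletesB_iff (licensePlate : String) (w : String) :
    pvCompletesB (pvNeedB licensePlate) w = true ↔
      ∀ c ∈ pvPlateA licensePlate,
        (pvPlateA licensePlate).count c ≤ w.toList.count c := by
  unfold pvCompletesB
  rw [pvNeedB_eq, PySem.Dict.foldl_insert_getD_add_one_eq_counter,
      PySem.Dict.items_counter]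
  simp only [List.all_map, List.all_eq_true, Function.comp, PySem.Dict.getD_counter,
    ge_iff_le, decide_eq_true_eq]
  constructor
  · intro h c hc
    exact_mod_cast h c ((PySem.Set.mem_ofList _ _).mpr hc)
  · intro h k hk
    exact_mod_cast h k ((PySem.Set.mem_ofList _ _).mp hk)

-- inserting one element into a key-sorted list, seen through find?
theorem find?_insertBy {α : Type} (P : α → Bool) (key : α → Int) (x : α) (s : List α)
    (hs : s.Pairwise (fun a b => key a ≤ key b)) :
    (PySem.List.insertBy (fun a b => decide (key a < key b)) x s).find? P =
      (if P x then
        match s.find? P with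
        | none => some x
        | some b => if key x < key b then some x else some b
      else s.find? P) := by
  induction s with
  | nil =>
    by_cases hp : P x <;> simp [PySem.List.insertBy, List.find?, hp]
  | cons y ys ih =>
    rw [PySem.List.insertBy]
    have hys : ys.Pairwise (fun a b => key a ≤ key b) := (List.pairwise_cons.mp hs).2
    by_cases hxy : key x < key y
    · rw [if_pos (by simpa using hxy)]
      by_cases hp : P x
      · rw [List.find?_cons_of_pos hp, if_pos hp]
        cases hfb : (y :: ys).find? P with
        | none => simp
        | some b =>
          have hb : b ∈ y :: ys := List.mem_of_find?_eq_some hfb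
          have hyb : key y ≤ key b := by
            rcases List.mem_cons.mp hb with rfl | hb'
            · exact le_rfl
            · exact (List.pairwise_cons.mp hs).1 b hb'
          simp [show key x < key b from lt_of_lt_of_le hxy hyb]
      · rw [List.find?_cons_of_neg hp, if_neg hp]
    · rw [if_neg (by simpa using hxy)]
      by_cases hpy : P y
      · rw [List.find?_cons_of_pos hpy, List.find?_cons_of_pos hpy]
        by_cases hp : P x <;> simp [hp, hxy]
      · rw [List.find?_cons_of_neg hpy, List.find?_cons_of_neg hpy, ih hys]

-- first match in the stable length-sorted list = single best-keeping pass
theorem find?_sorted_eq_foldl (need : PySem.Dict Char Int) (l : List String) :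
    (PySem.List.sorted l (fun w => PySem.Str.len w)).find? (fun w => pvCompletesB need w)
      = l.foldl (pvBStep need) none := by
  induction l using List.reverseRecOn with
  | nil => rfl
  | append_singleton l x ih =>
    have hsort : PySem.List.sorted (l ++ [x]) (fun w => PySem.Str.len w) =
        PySem.List.insertBy (fun a b => decide (PySem.Str.len a < PySem.Str.len b)) x
          (PySem.List.sorted l (fun w => PySem.Str.len w)) := by
      rw [PySem.List.sorted_eq_foldl_insertBy, PySem.List.sorted_eq_foldl_insertBy,
        List.foldl_append, List.foldl_cons, List.foldl_nil]
    rw [hsort,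
      find?_insertBy _ (fun w => PySem.Str.len w) x _ (PySem.List.sorted_pairwise l _), ih,
      List.foldl_append, List.foldl_cons, List.foldl_nil]
    cases hg : l.foldl (pvBStep need) none with
    | none => by_cases hp : pvCompletesB need x <;> simp [pvBStep, hp]
    | some b =>
      by_cases hge : PySem.Str.len x ≥ PySem.Str.len b
      · by_cases hp : pvCompletesB need x
        · simp [pvBStep, hp]
          simp at hge
          rw [if_neg (by omega), if_pos (by omega)]
        · simp [pvBStep, hp]
      · have hlt := lt_of_not_ge hge
        by_cases hp : pvCompletesB need x
        · simp [pvBStep, hp]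
          simp at hlt
          rw [if_pos (by omega), if_neg (by omega)]
        · simp [pvBStep, hp]

theorem pvALoop_eq_find? (plate : List Char) (l : List String) :
    pvALoop plate l = l.find? (fun w => pvACheck plate w.toList 0) := by
  induction l with
  | nil => rfl
  | cons w ws ih =>
    rw [pvALoop]
    by_cases hp : pvACheck plate w.toList 0
    · rw [if_pos hp, List.find?_cons_of_pos (by simpa using hp)]
    · rw [if_neg hp, List.find?_cons_of_neg (by simpa using hp), ih]

-- ===== VERDICT (by name: the statement is the Claim_ definition above) =====
theorem shortestCompletingWord_okay_spec : Claim_equal_shortestCompletingWord_okay := by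
  intro lp words _hdom hpre
  unfold Spec_shortestCompletingWord_okay shortestCompletingWord_okay shortestCompletingWord_okay_alt pvBLoop
  have hne : pvPlateA lp ≠ [] := by
    unfold Pre_shortestCompletingWord_okay at hpre
    rw [List.any_eq_true] at hpre
    obtain ⟨c, hc, hca⟩ := hpre
    unfold pvPlateA
    intro h
    rw [List.map_eq_nil_iff, List.filter_eq_nil_iff] at h
    exact h c hc hca
  have hpred : (fun w : String => pvACheck (pvPlateA lp) w.toList 0)
      = (fun w => pvCompletesB (pvNeedB lp) w) := by
    funext w
    rw [Bool.eq_iff_iff, pvACheck_zero_iff (pvPlateA lp) w.toList hne, pvCompletesB_iff lp w]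
  rw [pvALoop_eq_find?, hpred, find?_sorted_eq_foldl (pvNeedB lp) words]
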